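-- pv_equiv track=rewrite | github.com/Innobytix-IT/OpenPhoenix-ERP | OpenPhoenixERP_V2/core/services/platzhalter_service.py | _migrate_vorlagen
-- ===== SOURCE A (Python) =====
-- def _migrate_vorlagen(vorlagen: dict) -> dict:
--     """Migriert veraltete Platzhalter-Namen in gespeicherten Vorlagen."""
--     replacements = {
--         # Alt → Neu
--         "Sehr geehrte/r {{KUNDE_ANREDE_NAME}},": "{{BRIEFANREDE}}",
--         "{{KUNDE_ANREDE_NAME}}":                 "{{BRIEFANREDE}}",
--     }
--     result = {}
--     for key, text in vorlagen.items():
--         for old, new in replacements.items():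
--             text = text.replace(old, new)
--         result[key] = text
--     return result
-- ===== SOURCE B (Python) =====
-- def _migrate_vorlagen(vorlagen: dict) -> dict:
--     """Migriert veraltete Platzhalter-Namen in gespeicherten Vorlagen (ein Scan statt zwei replace-Durchlaeufe)."""
--     LONG = "Sehr geehrte/r {{KUNDE_ANREDE_NAME}},"
--     SHORT = "{{KUNDE_ANREDE_NAME}}"
--     NEW = "{{BRIEFANREDE}}"
--
--     def fix(text):
--         pieces = []
--         i = 0
--         n = len(text)
--         while i < n:
--             if text.startswith(LONG, i):
--                 pieces.append(NEW)
--                 i += len(LONG)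
--             elif text.startswith(SHORT, i):
--                 pieces.append(NEW)
--                 i += len(SHORT)
--             else:
--                 pieces.append(text[i])
--                 i += 1
--         return "".join(pieces)
--
--     return {key: fix(text) for key, text in vorlagen.items()}
-- ===== Notes on version B (the rewrite author's own statement) =====
-- stated objective: alternative
-- what changed: Each template value is rewritten in one left-to-right scan that at every position tries the longer deprecated phrase first, then the short placeholder, instead of A's two separate full-string str.replace passes.
import Mathlib
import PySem

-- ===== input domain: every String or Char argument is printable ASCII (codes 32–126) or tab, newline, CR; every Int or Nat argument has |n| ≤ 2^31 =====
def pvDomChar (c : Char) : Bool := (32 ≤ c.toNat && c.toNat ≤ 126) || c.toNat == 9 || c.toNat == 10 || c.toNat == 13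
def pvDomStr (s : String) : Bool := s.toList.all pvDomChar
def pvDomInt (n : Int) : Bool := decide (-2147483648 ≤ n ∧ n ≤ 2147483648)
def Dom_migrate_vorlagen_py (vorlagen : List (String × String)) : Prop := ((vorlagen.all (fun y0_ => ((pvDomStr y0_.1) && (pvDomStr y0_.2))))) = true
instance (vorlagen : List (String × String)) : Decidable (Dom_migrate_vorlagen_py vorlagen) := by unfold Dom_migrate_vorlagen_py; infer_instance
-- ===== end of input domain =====

-- B replaces A's two ordered full-string str.replace passes by ONE left-to-right scan that tries
-- the longer deprecated phrase first at each position (objective: alternative single-pass algorithm).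

-- ===== PORT A =====
-- port of _migrate_vorlagen: two str.replace passes (long phrase first) on every template value
def migrate_vorlagen_py (vorlagen : List (String × String)) : List (String × String) :=
  let replacements : List (String × String) :=
    [("Sehr geehrte/r {{KUNDE_ANREDE_NAME}},", "{{BRIEFANREDE}}"),
     ("{{KUNDE_ANREDE_NAME}}", "{{BRIEFANREDE}}")]
  let result :=
    vorlagen.foldl
      (fun (result : PySem.Dict String String) kv =>
        let text := replacements.foldl (fun t on => PySem.Str.replace t on.1 on.2) kv.2
        result.insert kv.1 text)
      PySem.Dict.empty
  result.items

-- ===== PORT B =====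
def pvLong : List Char := "Sehr geehrte/r {{KUNDE_ANREDE_NAME}},".toList
def pvShort : List Char := "{{KUNDE_ANREDE_NAME}}".toList
def pvNew : List Char := "{{BRIEFANREDE}}".toList

-- Source B's `fix`: the index-`i` while loop transcribed as recursion on the suffix text[i:]
def pvScan (s : List Char) : List Char :=
  match s with
  | [] => []
  | c :: r =>
    if PySem.Chars.startswith (c :: r) pvLong then
      pvNew ++ pvScan ((c :: r).drop pvLong.length)
    else if PySem.Chars.startswith (c :: r) pvShort then
      pvNew ++ pvScan ((c :: r).drop pvShort.length)
    else
      c :: pvScan r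
termination_by s.length
decreasing_by
  all_goals simp only [List.length_drop, List.length_cons]
  · have h : pvLong.length = 37 := by decide
    omega
  · have h : pvShort.length = 21 := by decide
    omega
  · omega

def migrate_vorlagen_py_alt (vorlagen : List (String × String)) : List (String × String) :=
  (vorlagen.foldl
      (fun (result : PySem.Dict String String) kv =>
        result.insert kv.1 (String.ofList (pvScan kv.2.toList)))
      PySem.Dict.empty).items

-- ===== PRECONDITION & SPEC =====
def Spec_migrate_vorlagen_py (vorlagen : List (String × String)) (out : List (String × String)) : Prop := out = migrate_vorlagen_py_alt vorlagen
instance (vorlagen : List (String × String)) (out : List (String × String)) : Decidable (Spec_migrate_vorlagen_py vorlagen out) := by unfold Spec_migrate_vorlagen_py; infer_instance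

-- ===== CLAIM (what is proved, stated in full; the proofs are below) =====
def Claim_equal_migrate_vorlagen_py : Prop := ∀ (vorlagen : List (String × String)), Dom_migrate_vorlagen_py vorlagen → Spec_migrate_vorlagen_py vorlagen (migrate_vorlagen_py vorlagen)

-- ===== LEMMAS AND PROOFS =====

-- Structural (fuel-free) characterisation of CPython's str.replace scan, for a nonempty pattern.
def pvRep (p n : List Char) (s : List Char) : List Char :=
  match s with
  | [] => []
  | c :: t =>
    if h : p.isPrefixOf (c :: t) ∧ p ≠ [] then n ++ pvRep p n ((c :: t).drop p.length)
    else c :: pvRep p n t  -- h is used by the termination proof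
termination_by s.length
decreasing_by
  all_goals simp only [List.length_drop, List.length_cons]
  · have := List.length_pos_iff.mpr h.2
    omega
  · omega

lemma pvRep_cons (p n : List Char) (c : Char) (t : List Char) :
    pvRep p n (c :: t) =
      if p.isPrefixOf (c :: t) ∧ p ≠ [] then n ++ pvRep p n ((c :: t).drop p.length)
      else c :: pvRep p n t := by
  rw [pvRep, dite_eq_ite]

lemma pvScan_cons (c : Char) (r : List Char) :
    pvScan (c :: r) =
      if PySem.Chars.startswith (c :: r) pvLong then pvNew ++ pvScan ((c :: r).drop pvLong.length)
      else if PySem.Chars.startswith (c :: r) pvShort then pvNew ++ pvScan ((c :: r).drop pvShort.length)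
      else c :: pvScan r := by
  rw [pvScan]

lemma pvGo_eq (p n : List Char) (hp : p ≠ []) :
    ∀ (fuel : Nat) (l acc : List Char), l.length ≤ fuel →
      PySem.Chars.replace.go p n fuel l acc = acc.reverse ++ pvRep p n l := by
  intro fuel
  induction fuel with
  | zero =>
    intro l acc hl
    have : l = [] := by cases l <;> simp_all
    subst this
    rw [PySem.Chars.replace.go]; simp [pvRep]
  | succ fuel ih =>
    intro l acc hl
    cases l with
    | nil =>
      rw [PySem.Chars.replace.go]
      all_goals first | omega | simp [pvRep]
    | cons c t =>
      rw [PySem.Chars.replace.go]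
      have hl' : t.length + 1 ≤ fuel + 1 := by simpa using hl
      by_cases h : p.isPrefixOf (c :: t)
      · have hplen : 0 < p.length := List.length_pos_iff.mpr hp
        rw [if_pos h, ih _ _ (by simp only [List.length_drop, List.length_cons]; omega)]
        rw [pvRep_cons, if_pos ⟨h, hp⟩]
        simp
      · rw [if_neg h, ih _ _ (by omega)]
        rw [pvRep_cons, if_neg (by simp [h])]
        simp

lemma pvReplace_eq (s p n : List Char) (hp : p ≠ []) :
    PySem.Chars.replace s p n = pvRep p n s := by
  unfold PySem.Chars.replace
  rw [if_neg (by simp [List.isEmpty_iff, hp])]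
  rw [pvGo_eq p n hp s.length s [] le_rfl]
  simp

-- finite character facts about the three literal phrases
lemma pvFactA : ∀ k, k < pvNew.length → ¬ (pvNew.drop k <+: pvShort) ∧ ¬ (pvShort <+: pvNew.drop k) := by decide

lemma pvFactB : ∀ j, j < pvShort.length → ¬ (pvShort.drop j <+: pvLong) ∧ ¬ (pvLong <+: pvShort.drop j) := by decide

lemma pvFactC : ∀ m, m < pvShort.length → ¬ (pvShort.drop m <+: pvNew) ∧ ¬ (pvNew <+: pvShort.drop m) := by decide

-- pvRep copies a block d verbatim when no suffix of d is prefix-comparable with the pattern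
lemma pvRep_append (p n : List Char) :
    ∀ (d : List Char), (∀ j, j < d.length → ¬ (d.drop j <+: p) ∧ ¬ (p <+: d.drop j)) →
      ∀ u, pvRep p n (d ++ u) = d ++ pvRep p n u := by
  intro d
  induction d with
  | nil => intro _ u; simp
  | cons c d' ih =>
    intro h u
    have hnotpre : ¬ (p.isPrefixOf (c :: (d' ++ u)) = true) := by
      intro hpre
      have hp1 : p <+: (c :: d') ++ u := by
        simpa using List.isPrefixOf_iff_prefix.mp hpre
      have hp2 : (c :: d') <+: (c :: d') ++ u := List.prefix_append _ _
      rcases List.prefix_or_prefix_of_prefix hp1 hp2 with hc | hc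
      · exact (h 0 (by simp)).2 hc
      · exact (h 0 (by simp)).1 hc
    show pvRep p n (c :: (d' ++ u)) = c :: d' ++ pvRep p n u
    rw [pvRep_cons, if_neg (by simp [hnotpre])]
    rw [ih (fun j hj => h (j + 1) (by simpa using Nat.succ_lt_succ hj)) u]
    simp

-- pvRep at an occurrence of the pattern itself
lemma pvRep_self (p n u : List Char) (hp : p ≠ []) :
    pvRep p n (p ++ u) = n ++ pvRep p n u := by
  cases p with
  | nil => exact absurd rfl hp
  | cons c p' =>
    show pvRep (c :: p') n (c :: (p' ++ u)) = n ++ pvRep (c :: p') n u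
    rw [pvRep_cons, if_pos ⟨List.isPrefixOf_iff_prefix.mpr (List.prefix_append _ _), hp⟩]
    congr 1
    rw [show (c :: (p' ++ u)).drop (c :: p').length = u from List.drop_left]

-- pass 1 (the long phrase) never creates a new occurrence of the short phrase
lemma pv_no_new_short :
    ∀ (u : List Char) (m : Nat), m ≤ pvShort.length →
      pvShort.drop m <+: pvRep pvLong pvNew u → pvShort.drop m <+: u := by
  intro u
  induction u using pvRep.induct pvLong with
  | case1 =>
    intro m hm h
    simpa [pvRep] using h
  | case2 c t hcond ih =>
    intro m hm h
    by_cases hm21 : m = pvShort.length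
    · subst hm21; simp
    · exfalso
      rw [pvRep_cons, if_pos hcond] at h
      have h2 : pvNew <+: pvNew ++ pvRep pvLong pvNew ((c :: t).drop pvLong.length) :=
        List.prefix_append _ _
      rcases List.prefix_or_prefix_of_prefix h h2 with hc | hc
      · exact (pvFactC m (by omega)).1 hc
      · exact (pvFactC m (by omega)).2 hc
  | case3 c t hcond ih =>
    intro m hm h
    by_cases hm21 : m = pvShort.length
    · subst hm21; simp
    · have hmlt : m < pvShort.length := by omega
      rw [pvRep_cons, if_neg hcond] at h
      rw [List.drop_eq_getElem_cons hmlt] at h ⊢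
      rcases List.cons_prefix_cons.mp h with ⟨hc, htail⟩
      exact List.cons_prefix_cons.mpr ⟨hc, ih (m + 1) (by omega) htail⟩

lemma pvLong_ne : pvLong ≠ [] := by decide
lemma pvShort_ne : pvShort ≠ [] := by decide

-- the heart: pass 2 after pass 1 equals the single combined scan
lemma pv_main (t : List Char) :
    pvRep pvShort pvNew (pvRep pvLong pvNew t) = pvScan t := by
  induction t using pvScan.induct with
  | case1 => simp [pvRep, pvScan]
  | case2 c r hL ih =>
    have hLpre : pvLong.isPrefixOf (c :: r) = true := by
      simpa [PySem.Chars.startswith] using hL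
    rw [pvRep_cons (p := pvLong), if_pos ⟨hLpre, pvLong_ne⟩]
    rw [pvRep_append pvShort pvNew pvNew pvFactA]
    rw [ih]
    rw [pvScan_cons, if_pos hL]
  | case3 c r hL hS ih =>
    have hSpre : pvShort <+: (c :: r) := by
      simpa [PySem.Chars.startswith, List.isPrefixOf_iff_prefix] using hS
    obtain ⟨u, hu⟩ := hSpre
    have hdrop : (c :: r).drop pvShort.length = u := by
      rw [← hu]; exact List.drop_left
    have hLpre : ¬ (pvLong.isPrefixOf (c :: r) = true) := by
      simpa [PySem.Chars.startswith] using hL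
    calc pvRep pvShort pvNew (pvRep pvLong pvNew (c :: r))
        = pvRep pvShort pvNew (pvRep pvLong pvNew (pvShort ++ u)) := by rw [hu]
      _ = pvRep pvShort pvNew (pvShort ++ pvRep pvLong pvNew u) := by
            rw [pvRep_append pvLong pvNew pvShort pvFactB]
      _ = pvNew ++ pvRep pvShort pvNew (pvRep pvLong pvNew u) :=
            pvRep_self pvShort pvNew _ pvShort_ne
      _ = pvNew ++ pvScan u := by rw [hdrop] at ih; rw [ih]
      _ = pvScan (c :: r) := by
            rw [pvScan_cons, if_neg hL, if_pos hS, hdrop]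
  | case4 c r hL hS ih =>
    have hLpre : ¬ (pvLong.isPrefixOf (c :: r) = true) := by
      simpa [PySem.Chars.startswith] using hL
    rw [pvRep_cons (p := pvLong), if_neg (by simp [hLpre])]
    have hno : ¬ (pvShort.isPrefixOf (c :: pvRep pvLong pvNew r) = true) := by
      intro hpre
      have h0 : pvShort.drop 0 <+: pvRep pvLong pvNew (c :: r) := by
        rw [pvRep_cons (p := pvLong), if_neg (by simp [hLpre])]
        simpa using List.isPrefixOf_iff_prefix.mp hpre
      have := pv_no_new_short (c :: r) 0 (by decide) h0
      have hSc : pvShort.isPrefixOf (c :: r) = true :=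
        List.isPrefixOf_iff_prefix.mpr (by simpa using this)
      simp [PySem.Chars.startswith, hSc] at hS
    rw [pvRep_cons (p := pvShort), if_neg (by simp [hno])]
    rw [ih]
    rw [pvScan_cons, if_neg hL, if_neg hS]

-- per-string equality of the two text transformations
lemma pv_fix_eq (s : String) :
    PySem.Str.replace (PySem.Str.replace s "Sehr geehrte/r {{KUNDE_ANREDE_NAME}}," "{{BRIEFANREDE}}")
        "{{KUNDE_ANREDE_NAME}}" "{{BRIEFANREDE}}"
      = String.ofList (pvScan s.toList) := by
  apply String.toList_inj.mp
  rw [String.toList_ofList]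
  rw [PySem.Str.toList_replace, PySem.Str.toList_replace]
  rw [pvReplace_eq _ _ _ (by decide), pvReplace_eq _ _ _ (by decide)]
  exact pv_main s.toList

-- ===== VERDICT (by name: the statement is the Claim_ definition above) =====
theorem migrate_vorlagen_py_spec : Claim_equal_migrate_vorlagen_py := by
  intro vorlagen _
  unfold Spec_migrate_vorlagen_py migrate_vorlagen_py migrate_vorlagen_py_alt
  have hf : (fun (result : PySem.Dict String String) (kv : String × String) =>
        result.insert kv.1
          ([("Sehr geehrte/r {{KUNDE_ANREDE_NAME}},", "{{BRIEFANREDE}}"),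
            ("{{KUNDE_ANREDE_NAME}}", "{{BRIEFANREDE}}")].foldl
            (fun t on => PySem.Str.replace t on.1 on.2) kv.2))
      = (fun (result : PySem.Dict String String) (kv : String × String) =>
        result.insert kv.1 (String.ofList (pvScan kv.2.toList))) := by
    funext result kv
    simp only [List.foldl]
    rw [pv_fix_eq]
  simp only [hf]
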